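-- pv_equiv track=rewrite | github.com/soyukke/lean-unsolved | scripts/confluence_mp_final_model_v2.py | inverse_syracuse_all_no_limit
-- ===== SOURCE A (Python) =====
-- def inverse_syracuse_all_no_limit(m):
--     preimages = []
--     for j in range(1, 40):
--         num = m * (1 << j) - 1
--         if num % 3 == 0:
--             n = num // 3
--             if n > 0 and n % 2 == 1:
--                 preimages.append(n)
--     return preimages
-- ===== SOURCE B (Python) =====
-- def inverse_syracuse_all_no_limit(m):
--     r = m % 3
--     if r == 0:
--         return []
--     j = 2 if r == 1 else 1
--     n = (m * (1 << j) - 1) // 3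
--     out = []
--     while j <= 39:
--         if n > 0 and n % 2 == 1:
--             out.append(n)
--         n = 4 * n + 1
--         j += 2
--     return out
-- ===== Notes on version B (the rewrite author's own statement) =====
-- stated objective: alternative
-- what changed: B picks the single valid j-parity class from the residue of m mod three (empty when divisible), computes the first preimage with one division, and derives each later preimage by the recurrence n -> 4n+1, instead of independently testing every shifted candidate.
import Mathlib
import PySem

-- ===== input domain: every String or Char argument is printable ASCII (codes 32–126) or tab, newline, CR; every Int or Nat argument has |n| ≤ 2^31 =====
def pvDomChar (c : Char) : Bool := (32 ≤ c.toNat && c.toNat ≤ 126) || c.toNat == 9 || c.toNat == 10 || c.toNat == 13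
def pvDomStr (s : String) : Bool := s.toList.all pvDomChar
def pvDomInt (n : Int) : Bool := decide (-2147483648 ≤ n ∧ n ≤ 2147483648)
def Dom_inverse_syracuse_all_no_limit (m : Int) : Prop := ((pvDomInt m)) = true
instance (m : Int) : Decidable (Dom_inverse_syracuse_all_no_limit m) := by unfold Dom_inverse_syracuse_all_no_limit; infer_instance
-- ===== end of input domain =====

-- B selects the valid j-parity from m % 3 and derives successive preimages by the recurrence n -> 4n+1
-- instead of testing all 39 shifts; proved to return exactly A's list.


-- ===== PORT A =====
-- body of A's for-loop, applied by foldl over range(1, 40)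
def stepA (m : Int) (preimages : List Int) (j : Int) : List Int :=
  let num := m * ((1 : Int) <<< j.toNat) - 1
  if PySem.Int.mod num 3 = 0 then
    let n := PySem.Int.floordiv num 3
    if n > 0 ∧ PySem.Int.mod n 2 = 1 then preimages ++ [n] else preimages
  else preimages

def inverse_syracuse_all_no_limit (m : Int) : List Int :=
  (PySem.List.pyRange 1 40 1).foldl (stepA m) []

-- ===== PORT B =====
-- B's while-loop: while j <= 39: append n if valid; n = 4*n+1; j += 2
def altLoop (n j : Int) (out : List Int) : List Int :=
  if j ≤ 39 then
    altLoop (4 * n + 1) (j + 2) (out ++ if n > 0 ∧ PySem.Int.mod n 2 = 1 then [n] else [])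
  else out
termination_by (40 - j).toNat
decreasing_by omega

def inverse_syracuse_all_no_limit_alt (m : Int) : List Int :=
  let r := PySem.Int.mod m 3
  if r = 0 then []
  else
    let j : Int := if r = 1 then 2 else 1
    let n := PySem.Int.floordiv (m * ((1 : Int) <<< j.toNat) - 1) 3
    altLoop n j []

-- ===== PRECONDITION & SPEC =====
def Spec_inverse_syracuse_all_no_limit (m : Int) (out : List Int) : Prop := out = inverse_syracuse_all_no_limit_alt m
instance (m : Int) (out : List Int) : Decidable (Spec_inverse_syracuse_all_no_limit m out) := by unfold Spec_inverse_syracuse_all_no_limit; infer_instance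

-- ===== CLAIM (what is proved, stated in full; the proofs are below) =====
def Claim_equal_inverse_syracuse_all_no_limit : Prop := ∀ (m : Int), Dom_inverse_syracuse_all_no_limit m → Spec_inverse_syracuse_all_no_limit m (inverse_syracuse_all_no_limit m)

-- ===== LEMMAS AND PROOFS =====

-- proof-only fuel view of B's while-loop: t remaining iterations
def fuelB : Nat → Int → List Int → List Int
  | 0, _, acc => acc
  | t + 1, n, acc => fuelB t (4 * n + 1) (acc ++ if n > 0 ∧ PySem.Int.mod n 2 = 1 then [n] else [])

lemma altLoop_eq_fuelB : ∀ (t : Nat) (j n : Int) (acc : List Int),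
    39 < j + 2 * t → j + 2 * t ≤ 41 → altLoop n j acc = fuelB t n acc := by
  intro t
  induction t with
  | zero =>
    intro j n acc h1 _
    rw [altLoop]
    simp only [fuelB]
    rw [if_neg (by omega)]
  | succ t ih =>
    intro j n acc h1 h2
    rw [altLoop, if_pos (by omega)]
    simp only [fuelB]
    exact ih (j + 2) (4 * n + 1) _ (by push_cast at h1 ⊢; omega) (by push_cast at h2 ⊢; omega)

lemma stepA_match (m n : Int) (j : Int) (acc : List Int)
    (h : 3 * n + 1 = m * 2 ^ j.toNat) :
    stepA m acc j = acc ++ (if n > 0 ∧ PySem.Int.mod n 2 = 1 then [n] else []) := by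
  simp only [stepA, Int.shiftLeft_eq, one_mul]
  have hnum : m * 2 ^ j.toNat - 1 = 3 * n := by omega
  rw [hnum]
  rw [PySem.Int.mod_eq_emod_of_pos (by norm_num : (0:Int) < 3)]
  rw [if_pos (by omega)]
  have hdiv : PySem.Int.floordiv (3 * n) 3 = n := by
    rw [PySem.Int.floordiv_eq_iff_of_pos (by norm_num : (0:Int) < 3)]; omega
  rw [hdiv]
  split_ifs with h1 <;> simp

lemma stepA_skip1 (m n : Int) (j : Int) (acc : List Int) (hj : 0 ≤ j)
    (h : 3 * n + 1 = m * 2 ^ j.toNat) :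
    stepA m acc (j + 1) = acc := by
  simp only [stepA, Int.shiftLeft_eq, one_mul]
  have ht : (j + 1).toNat = j.toNat + 1 := by omega
  rw [ht]
  have hnum : m * 2 ^ (j.toNat + 1) - 1 = 6 * n + 1 := by
    rw [pow_succ]
    have : m * (2 ^ j.toNat * 2) = (m * 2 ^ j.toNat) * 2 := by ring
    omega
  rw [hnum]
  rw [PySem.Int.mod_eq_emod_of_pos (by norm_num : (0:Int) < 3)]
  rw [if_neg (by omega)]

lemma stepA_skip0 (m : Int) (h : m % 3 = 0) (j : Int) (acc : List Int) :
    stepA m acc j = acc := by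
  simp only [stepA, Int.shiftLeft_eq, one_mul]
  obtain ⟨c, hc⟩ : ∃ c, m = 3 * c := ⟨m / 3, by omega⟩
  rw [hc]
  have hnum : 3 * c * 2 ^ j.toNat - 1 = 3 * (c * 2 ^ j.toNat) - 1 := by ring
  rw [hnum]
  rw [PySem.Int.mod_eq_emod_of_pos (by norm_num : (0:Int) < 3)]
  rw [if_neg (by omega)]

lemma fold_zero (m : Int) (h : m % 3 = 0) : ∀ (l : List Int) (acc : List Int),
    l.foldl (stepA m) acc = acc := by
  intro l
  induction l with
  | nil => intro acc; rfl
  | cons x xs ih => intro acc; simp only [List.foldl_cons, stepA_skip0 m h x acc, ih]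

-- even-length range starting at a matching j: t (match, skip) pairs
lemma fold_pairs (m : Int) : ∀ (t : Nat) (j n : Int) (acc : List Int), 0 ≤ j →
    3 * n + 1 = m * 2 ^ j.toNat →
    (PySem.List.pyRange j (j + 2 * t) 1).foldl (stepA m) acc = fuelB t n acc := by
  intro t
  induction t with
  | zero =>
    intro j n acc _ _
    rw [PySem.List.pyRange_one_eq_nil (by omega)]
    rfl
  | succ t ih =>
    intro j n acc hj h
    rw [PySem.List.pyRange_one_cons (by push_cast; omega)]
    rw [PySem.List.pyRange_one_cons (by push_cast; omega)]
    simp only [List.foldl_cons]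
    rw [stepA_match m n j acc h, stepA_skip1 m n j _ hj h]
    simp only [fuelB]
    have hrec : 3 * (4 * n + 1) + 1 = m * 2 ^ (j + 1 + 1).toNat := by
      have ht : (j + 1 + 1).toNat = j.toNat + 2 := by omega
      rw [ht, pow_succ, pow_succ]
      have : m * (2 ^ j.toNat * 2 * 2) = (m * 2 ^ j.toNat) * 4 := by ring
      omega
    have := ih (j + 1 + 1) (4 * n + 1) (acc ++ if n > 0 ∧ PySem.Int.mod n 2 = 1 then [n] else []) (by omega) hrec
    rw [show j + 1 + 1 + 2 * (t : Int) = j + 2 * ((t : Int) + 1) by ring] at this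
    push_cast
    exact this

-- odd-length range starting at a matching j: t pairs plus a final match
lemma fold_odd (m : Int) : ∀ (t : Nat) (j n : Int) (acc : List Int), 0 ≤ j →
    3 * n + 1 = m * 2 ^ j.toNat →
    (PySem.List.pyRange j (j + (2 * t + 1)) 1).foldl (stepA m) acc = fuelB (t + 1) n acc := by
  intro t
  induction t with
  | zero =>
    intro j n acc _ h
    norm_num
    simp only [fuelB]
    exact stepA_match m n j acc h
  | succ t ih =>
    intro j n acc hj h
    rw [PySem.List.pyRange_one_cons (by push_cast; omega)]
    rw [PySem.List.pyRange_one_cons (by push_cast; omega)]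
    simp only [List.foldl_cons]
    rw [stepA_match m n j acc h, stepA_skip1 m n j _ hj h]
    simp only [fuelB]
    have hrec : 3 * (4 * n + 1) + 1 = m * 2 ^ (j + 1 + 1).toNat := by
      have ht : (j + 1 + 1).toNat = j.toNat + 2 := by omega
      rw [ht, pow_succ, pow_succ]
      have : m * (2 ^ j.toNat * 2 * 2) = (m * 2 ^ j.toNat) * 4 := by ring
      omega
    have := ih (j + 1 + 1) (4 * n + 1) (acc ++ if n > 0 ∧ PySem.Int.mod n 2 = 1 then [n] else []) (by omega) hrec
    rw [show j + 1 + 1 + (2 * (t : Int) + 1) = j + (2 * ((t : Int) + 1) + 1) by ring] at this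
    push_cast
    exact this

-- ===== VERDICT (by name: the statement is the Claim_ definition above) =====
theorem inverse_syracuse_all_no_limit_spec : Claim_equal_inverse_syracuse_all_no_limit := by
  intro m _
  unfold Spec_inverse_syracuse_all_no_limit inverse_syracuse_all_no_limit inverse_syracuse_all_no_limit_alt
  simp only []
  rw [PySem.Int.mod_eq_emod_of_pos (by norm_num : (0:Int) < 3)]
  have h3 : m % 3 = 0 ∨ m % 3 = 1 ∨ m % 3 = 2 := by omega
  rcases h3 with h | h | h
  · rw [if_pos h]
    exact fold_zero m h _ []
  · -- m ≡ 1 mod 3: j0 = 2; A skips j = 1 then runs 19 (match, skip) pairs over 2..39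
    rw [if_neg (by omega), if_pos h]
    obtain ⟨c, hc⟩ : ∃ c, m = 3 * c + 1 := ⟨m / 3, by omega⟩
    have hn0 : PySem.Int.floordiv (m * ((1 : Int) <<< (2 : Int).toNat) - 1) 3 = 4 * c + 1 := by
      have ht2 : (2 : Int).toNat = 2 := rfl
      rw [Int.shiftLeft_eq, ht2]
      rw [PySem.Int.floordiv_eq_iff_of_pos (by norm_num : (0:Int) < 3)]
      norm_num; omega
    rw [hn0]
    have hrel : 3 * (4 * c + 1) + 1 = m * 2 ^ (2 : Int).toNat := by
      have ht2 : (2 : Int).toNat = 2 := rfl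
      rw [ht2]; norm_num; omega
    have hA : (PySem.List.pyRange 1 40 1).foldl (stepA m) [] = fuelB 19 (4 * c + 1) [] := by
      rw [PySem.List.pyRange_one_cons (by norm_num)]
      simp only [List.foldl_cons]
      have hskip : stepA m [] 1 = [] := by
        have : (1 : Int) = 0 + 1 := by norm_num
        rw [this]
        exact stepA_skip1 m c 0 [] (by norm_num) (by norm_num; omega)
      rw [hskip]
      have := fold_pairs m 19 2 (4 * c + 1) [] (by norm_num) hrel
      norm_num at this
      exact this
    rw [hA, altLoop_eq_fuelB 19 2 (4 * c + 1) [] (by norm_num) (by norm_num)]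
  · -- m ≡ 2 mod 3: j0 = 1; A runs 19 (match, skip) pairs plus a final match over 1..39
    rw [if_neg (by omega), if_neg (by omega)]
    obtain ⟨c, hc⟩ : ∃ c, m = 3 * c + 2 := ⟨m / 3, by omega⟩
    have hn0 : PySem.Int.floordiv (m * ((1 : Int) <<< (1 : Int).toNat) - 1) 3 = 2 * c + 1 := by
      have ht1 : (1 : Int).toNat = 1 := rfl
      rw [Int.shiftLeft_eq, ht1]
      rw [PySem.Int.floordiv_eq_iff_of_pos (by norm_num : (0:Int) < 3)]
      norm_num; omega
    rw [hn0]
    have hrel : 3 * (2 * c + 1) + 1 = m * 2 ^ (1 : Int).toNat := by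
      have ht1 : (1 : Int).toNat = 1 := rfl
      rw [ht1]; norm_num; omega
    have hA : (PySem.List.pyRange 1 40 1).foldl (stepA m) [] = fuelB 20 (2 * c + 1) [] := by
      have := fold_odd m 19 1 (2 * c + 1) [] (by norm_num) hrel
      norm_num at this
      exact this
    rw [hA, altLoop_eq_fuelB 20 1 (2 * c + 1) [] (by norm_num) (by norm_num)]
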